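-- pv_equiv track=rewrite | github.com/fairyBuster/sentot-backend | config/mobile_restriction_middleware.py | is_mobile
-- ===== SOURCE A (Python) =====
-- def is_mobile(user_agent):
--     """
--     Check if the User-Agent string indicates a mobile device.
--     """
--     if not user_agent:
--         return False
--
--     # Common mobile user agent keywords
--     mobile_keywords = [
--         'Mobile', 'Android', 'iPhone', 'iPad', 'iPod',
--         'webOS', 'BlackBerry', 'Windows Phone', 'Opera Mini',
--         'IEMobile'
--     ]
--
--     return any(keyword in user_agent for keyword in mobile_keywords)
-- ===== SOURCE B (Python) =====
-- def is_mobile(user_agent):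
--     """
--     Check if the User-Agent string indicates a mobile device.
--     """
--     if not user_agent:
--         return False
--
--     # Keywords grouped by first character: one explicit left-to-right walk
--     # over the string; at each position, look up the current character in the
--     # dispatch table and check whether one of its tails follows.
--     tails_by_first = {
--         'M': ['obile'],
--         'A': ['ndroid'],
--         'i': ['Phone', 'Pad', 'Pod'],
--         'w': ['ebOS'],
--         'B': ['lackBerry'],
--         'W': ['indows Phone'],
--         'O': ['pera Mini'],
--         'I': ['EMobile'],
--     }
--
--     rest = user_agent
--     while rest:
--         after = rest[1:]
--         for tail in tails_by_first.get(rest[0], []):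
--             if after.startswith(tail):
--                 return True
--         rest = after
--     return False
-- ===== Notes on version B (the rewrite author's own statement) =====
-- stated objective: alternative
-- what changed: A runs one full substring scan of the user agent per keyword; B instead walks the string once with an explicit loop, dispatching at each position through a first-character table (dict of keyword tails) and checking only the matching tails with startswith.
import Mathlib
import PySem

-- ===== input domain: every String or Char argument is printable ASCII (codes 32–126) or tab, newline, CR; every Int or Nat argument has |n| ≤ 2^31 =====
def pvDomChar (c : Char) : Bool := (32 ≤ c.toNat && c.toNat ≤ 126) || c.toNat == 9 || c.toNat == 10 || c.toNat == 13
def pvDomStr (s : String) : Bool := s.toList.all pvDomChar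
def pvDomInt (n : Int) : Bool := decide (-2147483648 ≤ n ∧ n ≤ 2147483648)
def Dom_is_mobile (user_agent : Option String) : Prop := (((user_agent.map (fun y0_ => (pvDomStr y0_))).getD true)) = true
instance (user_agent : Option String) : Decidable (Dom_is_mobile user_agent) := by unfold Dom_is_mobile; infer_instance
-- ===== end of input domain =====

set_option maxRecDepth 4000


-- B replaces A's per-keyword substring scans by one explicit walk over the string with a
-- first-character dispatch table of keyword tails; objective: alternative, same result.

-- ===== PORT A =====
def mobileKeywordsA : List String :=
  ["Mobile", "Android", "iPhone", "iPad", "iPod",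
   "webOS", "BlackBerry", "Windows Phone", "Opera Mini",
   "IEMobile"]

def is_mobile (user_agent : Option String) : Bool :=
  match user_agent with
  | none => false                -- 'not user_agent' is true for None
  | some s =>
    if s = "" then false         -- … and for the empty string
    else mobileKeywordsA.any (fun keyword => PySem.Str.isIn keyword s)

-- ===== PORT B =====
-- the Python dict 'tails_by_first' (insertion order, first-match lookup)
def tailsByFirst : PySem.Dict Char (List String) :=
  PySem.Dict.mk
  [('M', ["obile"]),
   ('A', ["ndroid"]),
   ('i', ["Phone", "Pad", "Pod"]),
   ('w', ["ebOS"]),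
   ('B', ["lackBerry"]),
   ('W', ["indows Phone"]),
   ('O', ["pera Mini"]),
   ('I', ["EMobile"])]

-- the 'while rest:' loop: structural recursion on the remaining characters
def mobileScan : List Char → Bool
  | [] => false
  | c :: after =>
    if (PySem.Dict.getD tailsByFirst c []).any
         (fun tail => PySem.Chars.startswith after tail.toList) then true
    else mobileScan after

def is_mobile_alt (user_agent : Option String) : Bool :=
  match user_agent with
  | none => false
  | some s =>
    if s = "" then false
    else mobileScan s.toList

-- ===== PRECONDITION & SPEC =====
def Spec_is_mobile (user_agent : Option String) (out : Bool) : Prop := out = is_mobile_alt user_agent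
instance (user_agent : Option String) (out : Bool) : Decidable (Spec_is_mobile user_agent out) := by unfold Spec_is_mobile; infer_instance

-- ===== CLAIM (what is proved, stated in full; the proofs are below) =====
def Claim_equal_is_mobile : Prop := ∀ (user_agent : Option String), Dom_is_mobile user_agent → Spec_is_mobile user_agent (is_mobile user_agent)

-- ===== LEMMAS AND PROOFS =====

-- at the head position, 'some keyword is a prefix' = 'some tail from the dispatch
-- table entry of the head character follows'
theorem head_dispatch (c : Char) (after : List Char) :
    mobileKeywordsA.any (fun k => PySem.Chars.startswith (c :: after) k.toList) =
    (PySem.Dict.getD tailsByFirst c []).any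
      (fun tail => PySem.Chars.startswith after tail.toList) := by
  have hsw : ∀ (d : Char) (p : List Char),
      PySem.Chars.startswith (c :: after) (d :: p) =
      ((c == d) && PySem.Chars.startswith after p) := by
    intro d p
    rw [Bool.eq_iff_iff]
    simp only [PySem.Chars.startswith_iff, Bool.and_eq_true, beq_iff_eq, List.cons_prefix_cons]
    exact ⟨fun ⟨a, b⟩ => ⟨a.symm, b⟩, fun ⟨a, b⟩ => ⟨a.symm, b⟩⟩
  simp only [mobileKeywordsA, tailsByFirst, PySem.Dict.getD, PySem.Dict.get?_mk_cons]
  simp only [List.any_cons, List.any_nil]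
  norm_num [hsw]
  split_ifs with h1 h2 h3 h4 h5 h6 h7 h8 <;> (try subst_vars) <;>
    simp_all [PySem.Dict.get?, List.find?]
  exact ⟨fun h => absurd h.symm h1, fun h => absurd h.symm h2, fun h => absurd h.symm h3,
         fun h => absurd h.symm h3, fun h => absurd h.symm h3, fun h => absurd h.symm h4,
         fun h => absurd h.symm h5, fun h => absurd h.symm h6, fun h => absurd h.symm h7,
         fun h => absurd h.symm h8⟩

-- keyword-major substring search = B's head-dispatch walk
theorem kwsearch_eq_scan (l : List Char) :
    mobileKeywordsA.any (fun k => PySem.Chars.isIn k.toList l) = mobileScan l := by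
  induction l with
  | nil => decide
  | cons c after ih =>
    have step : mobileKeywordsA.any (fun k => PySem.Chars.isIn k.toList (c :: after)) =
        (mobileKeywordsA.any (fun k => PySem.Chars.startswith (c :: after) k.toList) ||
         mobileKeywordsA.any (fun k => PySem.Chars.isIn k.toList after)) := by
      rw [Bool.eq_iff_iff]
      simp only [Bool.or_eq_true, List.any_eq_true, PySem.Chars.isIn_iff_infix,
        PySem.Chars.startswith_iff, List.infix_cons_iff]
      constructor
      · rintro ⟨k, hk, h | h⟩
        · exact Or.inl ⟨k, hk, h⟩
        · exact Or.inr ⟨k, hk, h⟩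
      · rintro (⟨k, hk, h⟩ | ⟨k, hk, h⟩)
        · exact ⟨k, hk, Or.inl h⟩
        · exact ⟨k, hk, Or.inr h⟩
    rw [step, head_dispatch, ih, mobileScan]
    cases (PySem.Dict.getD tailsByFirst c []).any
        (fun tail => PySem.Chars.startswith after tail.toList) <;> simp

-- ===== VERDICT (by name: the statement is the Claim_ definition above) =====
theorem is_mobile_spec : Claim_equal_is_mobile := by
  intro ua _
  unfold Spec_is_mobile is_mobile is_mobile_alt
  cases ua with
  | none => rfl
  | some s =>
    simp only []
    split_ifs with h
    · rfl
    · simpa using kwsearch_eq_scan s.toList
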